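-- pv_equiv track=rewrite | github.com/vgrem/Office365-REST-Python-Client | office365/sharepoint/helpers/camlquery_builder.py | recursive_builder
-- ===== SOURCE A (Python) =====
-- def recursive_builder(queries, operator='And'):
--     if queries:
--         query = queries.pop()
--         if len(queries) == 0:
--             return query
--         elif len(queries) == 1:
--             last_query = queries.pop()
--             return f'<{operator}>' + query + last_query + f'</{operator}>'
--         else:
--             return f'<{operator}>' + query + recursive_builder(queries, operator) + f'</{operator}>'
--     return ''
-- ===== SOURCE B (Python) =====
-- def recursive_builder(queries, operator='And'):
--     n = len(queries)
--     if n == 0: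
--         return ''
--     if n == 1:
--         res = queries[0]
--     else:
--         acc = f'<{operator}>' + queries[1] + queries[0] + f'</{operator}>'
--         for i in range(2, n):
--             acc = f'<{operator}>' + queries[i] + acc + f'</{operator}>'
--         res = acc
--     del queries[:]  # A pops every element; reproduce the observable mutation
--     return res
-- ===== Notes on version B (the rewrite author's own statement) =====
-- stated objective: alternative
-- what changed: Replaces the pop-and-recurse descent with an explicit iterative left fold: the innermost <op>q1 q0</op> pair is built first and each further element wraps the accumulator, with no recursion and no repeated pops.
import Mathlib
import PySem

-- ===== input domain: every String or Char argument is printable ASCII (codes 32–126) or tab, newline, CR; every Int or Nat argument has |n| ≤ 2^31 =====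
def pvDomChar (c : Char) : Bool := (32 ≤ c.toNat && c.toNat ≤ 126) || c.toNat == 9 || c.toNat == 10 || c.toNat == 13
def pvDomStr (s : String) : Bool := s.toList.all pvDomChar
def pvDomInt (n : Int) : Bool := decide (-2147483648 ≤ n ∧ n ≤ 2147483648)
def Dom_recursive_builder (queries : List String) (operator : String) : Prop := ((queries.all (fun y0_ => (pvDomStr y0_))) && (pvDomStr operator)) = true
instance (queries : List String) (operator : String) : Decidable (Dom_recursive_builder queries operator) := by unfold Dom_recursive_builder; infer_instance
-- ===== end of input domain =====

-- B replaces A's pop-and-recurse with an explicit iterative fold (different decomposition, same cost).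
-- A MUTATES its argument (pops every element); B reproduces that in Python (del queries[:]); the equivalence proved here is about the RETURN value.
-- ===== PORT A =====
def recursive_builder (queries : List String) (operator : String) : String :=
  if hq : queries = [] then ""
  else
    -- queries.pop() = last element; remaining list = dropLast
    let query := queries.getLast hq
    let rest := queries.dropLast
    if rest.length = 0 then query
    else if rest.length = 1 then
      "<" ++ operator ++ ">" ++ query ++ rest.getLast! ++ "</" ++ operator ++ ">"
    else
      "<" ++ operator ++ ">" ++ query ++ recursive_builder rest operator ++ "</" ++ operator ++ ">"
termination_by queries.length
decreasing_by simp [List.length_dropLast]; exact List.length_pos_iff.mpr hq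

-- ===== PORT B =====
def recursive_builder_alt (queries : List String) (operator : String) : String :=
  match queries with
  | [] => ""
  | [q0] => q0
  | q0 :: q1 :: rest =>
    rest.foldl (fun acc q => "<" ++ operator ++ ">" ++ q ++ acc ++ "</" ++ operator ++ ">")
      ("<" ++ operator ++ ">" ++ q1 ++ q0 ++ "</" ++ operator ++ ">")

-- ===== PRECONDITION & SPEC =====
def Spec_recursive_builder (queries : List String) (operator : String) (out : String) : Prop := out = recursive_builder_alt queries operator
instance (queries : List String) (operator : String) (out : String) : Decidable (Spec_recursive_builder queries operator out) := by unfold Spec_recursive_builder; infer_instance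

-- ===== CLAIM (what is proved, stated in full; the proofs are below) =====
def Claim_equal_recursive_builder : Prop := ∀ (queries : List String) (operator : String), Dom_recursive_builder queries operator → Spec_recursive_builder queries operator (recursive_builder queries operator)

-- ===== LEMMAS AND PROOFS =====
lemma recursive_builder_cons_cons (op q0 q1 : String) (l : List String) :
    recursive_builder (q0 :: q1 :: l) op =
      l.foldl (fun acc q => "<" ++ op ++ ">" ++ q ++ acc ++ "</" ++ op ++ ">")
        ("<" ++ op ++ ">" ++ q1 ++ q0 ++ "</" ++ op ++ ">") := by
  induction l using List.reverseRecOn with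
  | nil =>
    rw [recursive_builder.eq_def]
    simp [List.getLast!]
  | append_singleton l' x ih =>
    rw [recursive_builder.eq_def]
    have h : q0 :: q1 :: (l' ++ [x]) = (q0 :: q1 :: l') ++ [x] := rfl
    rw [h]
    simp [List.foldl_append]
    rw [show (q1 :: (l' ++ [x])).dropLast = q1 :: l' from by
          rw [show q1 :: (l' ++ [x]) = (q1 :: l') ++ [x] from rfl, List.dropLast_concat]]
    exact ih

-- ===== VERDICT (by name: the statement is the Claim_ definition above) =====
theorem recursive_builder_spec : Claim_equal_recursive_builder := by
  intro queries op _
  unfold Spec_recursive_builder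
  match queries with
  | [] => rw [recursive_builder.eq_def]; rfl
  | [q0] => rw [recursive_builder.eq_def]; rfl
  | q0 :: q1 :: rest => rw [recursive_builder_cons_cons]; rfl
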